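-- pv_equiv track=rewrite | github.com/chenyuhang55555/Python | Test/sixie4.py | solution
-- ===== SOURCE A (Python) =====
-- def solution(A):
--     l = len(A)
--
--     if l == 1:
--         return 0
--
--     current_val = A[0]
--
--     # double pointers
--     i=0
--     j=l-1
--     flag = True
--     while i<=j:
--         if flag:
--             if A[j] != current_val:
--                 return j
--             j -= 1
--         else:
--             if A[i] != current_val:
--                 return l-1-i
--             i += 1
--         flag = not flag
--     return 0
-- ===== SOURCE B (Python) =====
-- def solution(A):
--     l = len(A)
--     first = A[0]
--     best = None
--     for p in range(l):
--         if A[p] != first: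
--             d = min(p, l - 1 - p)
--             if best is None or d < best:
--                 best = d
--     return 0 if best is None else l - 1 - best
-- ===== Notes on version B (the rewrite author's own statement) =====
-- stated objective: alternative
-- what changed: Replaced the alternating two-pointer early-returning scan with a single forward pass that computes the minimal end-distance d = min(p, l-1-p) over all mismatching indices and returns l-1-d (0 if none).
import Mathlib
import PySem

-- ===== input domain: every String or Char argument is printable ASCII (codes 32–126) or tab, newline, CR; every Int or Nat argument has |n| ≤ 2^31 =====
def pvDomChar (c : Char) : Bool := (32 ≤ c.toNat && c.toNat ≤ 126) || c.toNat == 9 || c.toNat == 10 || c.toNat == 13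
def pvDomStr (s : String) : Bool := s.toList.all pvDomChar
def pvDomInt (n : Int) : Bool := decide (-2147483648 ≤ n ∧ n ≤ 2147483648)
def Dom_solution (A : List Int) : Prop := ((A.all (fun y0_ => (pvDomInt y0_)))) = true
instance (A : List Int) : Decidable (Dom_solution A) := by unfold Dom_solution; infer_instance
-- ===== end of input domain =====

-- B replaces A's alternating two-pointer early-return scan by one forward pass keeping the
-- minimal end-distance d = min(p, l-1-p) over mismatching indices, returning l-1-d (0 if none).

-- ===== PORT A =====
-- the while loop of A: state (i, j, flag); indices stay within [0, l-1] on admitted inputs,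
-- so A[i] / A[j] are ported as pyGet? with default 0 (never used in range)
def solLoop (A : List Int) (l cv i j : Int) (flag : Bool) : Int :=
  if _h : i ≤ j then
    if flag then
      if (PySem.List.pyGet? A j).getD 0 ≠ cv then j
      else solLoop A l cv i (j - 1) (!flag)
    else
      if (PySem.List.pyGet? A i).getD 0 ≠ cv then l - 1 - i
      else solLoop A l cv (i + 1) j (!flag)
  else 0
termination_by (j + 1 - i).toNat
decreasing_by all_goals omega

def solution (A : List Int) : Int :=
  let l : Int := (A.length : Int)
  if l == 1 then 0
  else
    let currentVal : Int := (PySem.List.pyGet? A 0).getD 0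
    solLoop A l currentVal 0 (l - 1) true

-- ===== PORT B =====
def solution_alt (A : List Int) : Int :=
  let l : Int := (A.length : Int)
  let first : Int := (PySem.List.pyGet? A 0).getD 0
  let best : Option Int := (List.range A.length).foldl (fun (best : Option Int) (p : Nat) =>
    if (PySem.List.pyGet? A (p : Int)).getD 0 ≠ first then
      let d : Int := min (p : Int) (l - 1 - (p : Int))
      match best with
      | none => some d
      | some b => if d < b then some d else some b
    else best) none
  match best with
  | none => 0
  | some b => l - 1 - b

-- ===== PRECONDITION & SPEC =====
-- Pre_ excludes only the empty list, on which Python A raises IndexError reading the first element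
def Pre_solution (A : List Int) : Prop := A ≠ []
instance (A : List Int) : Decidable (Pre_solution A) := by unfold Pre_solution; infer_instance
def pvWitness_solution : List Int := ([1, 2, 3])

def Spec_solution (A : List Int) (out : Int) : Prop := out = solution_alt A
instance (A : List Int) (out : Int) : Decidable (Spec_solution A out) := by unfold Spec_solution; infer_instance

-- ===== CLAIM (what is proved, stated in full; the proofs are below) =====
def Claim_equal_solution : Prop := ∀ (A : List Int), Dom_solution A → Pre_solution A → Spec_solution A (solution A)

-- ===== LEMMAS AND PROOFS =====

-- mismatch test at (Nat) position p, exactly as both ports access the list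
def pvMism (A : List Int) (cv : Int) (p : Nat) : Bool :=
  decide ((PySem.List.pyGet? A (p : Int)).getD 0 ≠ cv)

-- end-distance of position p
def pvD (L : Int) (p : Nat) : Int := min (p : Int) (L - 1 - (p : Int))

-- candidate distances over a window of positions
def pvCand (A : List Int) (cv : Int) (ps : List Nat) : List Int :=
  (ps.filter (pvMism A cv)).map (pvD (A.length : Int))

-- minimal candidate, if any
def pvBest (A : List Int) (cv : Int) (ps : List Nat) : Option Int :=
  match pvCand A cv ps with
  | [] => none
  | c :: cs => some (cs.foldl min c)

def pvOut (L : Int) (o : Option Int) : Int :=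
  match o with
  | none => 0
  | some b => L - 1 - b

-- the option-min step function of port B
def pvStep (o : Option Int) (d : Int) : Option Int :=
  match o with
  | none => some d
  | some b => if d < b then some d else some b

lemma pvStep_some (b d : Int) : pvStep (some b) d = some (min b d) := by
  show (if d < b then some d else some b) = some (min b d)
  split_ifs with h <;> simp <;> omega

lemma foldl_pvStep_some (xs : List Int) : ∀ b : Int,
    xs.foldl pvStep (some b) = some (xs.foldl min b) := by
  induction xs with
  | nil => intro b; rfl
  | cons c cs ih => intro b; simp [List.foldl, pvStep_some, ih]

lemma foldl_pvStep_none (xs : List Int) :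
    xs.foldl pvStep none = match xs with | [] => none | c :: cs => some (cs.foldl min c) := by
  cases xs with
  | nil => rfl
  | cons c cs => simp [List.foldl, pvStep, foldl_pvStep_some]

-- port B's fold is pvStep folded over the candidate list
lemma foldB_eq (A : List Int) (cv : Int) (ps : List Nat) : ∀ acc : Option Int,
    ps.foldl (fun (best : Option Int) (p : Nat) =>
      if (PySem.List.pyGet? A (p : Int)).getD 0 ≠ cv then
        pvStep best (min (p : Int) ((A.length : Int) - 1 - (p : Int)))
      else best) acc
    = (pvCand A cv ps).foldl pvStep acc := by
  induction ps with
  | nil => intro acc; rfl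
  | cons p ps ih =>
    intro acc
    simp only [List.foldl_cons]
    by_cases h : (PySem.List.pyGet? A (p : Int)).getD 0 ≠ cv
    · have hb : pvMism A cv p = true := by unfold pvMism; exact decide_eq_true h
      have hc : pvCand A cv (p :: ps) = pvD (A.length : Int) p :: pvCand A cv ps := by
        simp only [pvCand, List.filter_cons, hb, if_true, List.map_cons]
      rw [if_pos h, ih, hc, List.foldl_cons]
      rfl
    · have hb : pvMism A cv p = false := by unfold pvMism; exact decide_eq_false h
      have hc : pvCand A cv (p :: ps) = pvCand A cv ps := by
        simp [pvCand, hb]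
      rw [if_neg h, ih, hc]

lemma solution_alt_char (A : List Int) :
    solution_alt A
      = pvOut (A.length : Int)
          (pvBest A ((PySem.List.pyGet? A 0).getD 0) (List.range' 0 A.length)) := by
  show (match (List.range A.length).foldl _ none with
        | none => (0 : Int)
        | some b => (A.length : Int) - 1 - b) = _
  rw [List.range_eq_range']
  have := foldB_eq A ((PySem.List.pyGet? A 0).getD 0) (List.range' 0 A.length) none
  simp only [pvStep] at this
  rw [this, foldl_pvStep_none]
  unfold pvBest pvOut
  cases pvCand A ((PySem.List.pyGet? A 0).getD 0) (List.range' 0 A.length) <;> rfl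

-- folding min stays ≤ any member, and ≥ any common lower bound
lemma foldl_min_le (xs : List Int) : ∀ c x : Int, x ∈ c :: xs → xs.foldl min c ≤ x := by
  induction xs with
  | nil => intro c x hx; simp at hx; simp [hx]
  | cons a as ih =>
    intro c x hx
    simp only [List.foldl_cons]
    have hseed : as.foldl min (min c a) ≤ min c a := ih (min c a) (min c a) (by simp)
    simp only [List.mem_cons] at hx
    rcases hx with rfl | rfl | h
    · exact le_trans hseed (min_le_left _ _)
    · exact le_trans hseed (min_le_right _ _)
    · exact ih (min c a) x (List.mem_cons_of_mem _ h)

lemma le_foldl_min (xs : List Int) : ∀ (c m : Int), m ≤ c → (∀ x ∈ xs, m ≤ x) →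
    m ≤ xs.foldl min c := by
  induction xs with
  | nil => intro c m hc _; simpa using hc
  | cons a as ih =>
    intro c m hc hall
    simp only [List.foldl_cons]
    exact ih (min c a) m (le_min hc (hall a (by simp))) (fun x hx => hall x (by simp [hx]))

lemma pvBest_eq_some (A : List Int) (cv : Int) (ps : List Nat) (m : Int)
    (hmem : m ∈ pvCand A cv ps) (hle : ∀ x ∈ pvCand A cv ps, m ≤ x) :
    pvBest A cv ps = some m := by
  unfold pvBest
  cases hc : pvCand A cv ps with
  | nil => rw [hc] at hmem; simp at hmem
  | cons c cs =>
    rw [hc] at hmem hle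
    have h1 : cs.foldl min c ≤ m := foldl_min_le cs c m hmem
    have h2 : m ≤ cs.foldl min c := by
      apply le_foldl_min
      · exact hle c (by simp)
      · intro x hx; exact hle x (by simp [hx])
    show some (cs.foldl min c) = some m
    rw [le_antisymm h1 h2]

lemma pvCand_append (A : List Int) (cv : Int) (ps qs : List Nat) :
    pvCand A cv (ps ++ qs) = pvCand A cv ps ++ pvCand A cv qs := by
  simp [pvCand]

-- every candidate of the window [i, i+n) is ≥ its boundary distance
lemma pvCand_lb (A : List Int) (cv : Int) (i n : Nat) (m : Int)
    (hm : m ≤ (i : Int)) (hm2 : m ≤ (A.length : Int) - (i : Int) - (n : Int)) :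
    ∀ x ∈ pvCand A cv (List.range' i n), m ≤ x := by
  intro x hx
  simp only [pvCand, List.mem_map, List.mem_filter, List.mem_range'_1] at hx
  obtain ⟨p, ⟨⟨hp1, hp2⟩, _⟩, rfl⟩ := hx
  unfold pvD
  have : (i : Int) ≤ (p : Int) := by exact_mod_cast hp1
  have : (p : Int) < (i : Int) + (n : Int) := by exact_mod_cast hp2
  omega

-- membership of a mismatching position's distance in the window's candidates
lemma pvCand_mem (A : List Int) (cv : Int) (i n p : Nat)
    (hp : p ∈ List.range' i n) (hm : pvMism A cv p = true) :
    pvD (A.length : Int) p ∈ pvCand A cv (List.range' i n) := by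
  simp only [pvCand, List.mem_map, List.mem_filter]
  exact ⟨p, ⟨hp, hm⟩, rfl⟩

-- characterization of A's loop on a window with the alternation invariant
lemma solLoop_char (A : List Int) (cv : Int) : ∀ (n i : Nat) (flag : Bool),
    2 * i + n + (cond flag 0 1) = A.length →
    solLoop A (A.length : Int) cv (i : Int) ((i : Int) + (n : Int) - 1) flag
      = pvOut (A.length : Int) (pvBest A cv (List.range' i n)) := by
  intro n
  induction n with
  | zero =>
    intro i flag _
    have hcond : ¬ ((i : Int) ≤ (i : Int) + ((0 : Nat) : Int) - 1) := by push_cast; omega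
    rw [solLoop, dif_neg hcond]
    simp [pvBest, pvCand, pvOut]
  | succ m ih =>
    intro i flag hinv
    have hij : (i : Int) ≤ (i : Int) + ((m + 1 : Nat) : Int) - 1 := by push_cast; omega
    rw [solLoop, dif_pos hij]
    cases flag with
    | true =>
      have hj : (i : Int) + ((m + 1 : Nat) : Int) - 1 = ((i + m : Nat) : Int) := by
        push_cast; ring
      rw [if_pos rfl, hj]
      by_cases hm : (PySem.List.pyGet? A ((i + m : Nat) : Int)).getD 0 ≠ cv
      · -- mismatch at the right end: A returns j, the minimal candidate is i
        have hb : pvMism A cv (i + m) = true := decide_eq_true hm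
        have hL : (A.length : Int) = 2 * i + m + 1 := by
          simp only [Bool.cond_true] at hinv; push_cast [← hinv]; ring
        have hdj : pvD (A.length : Int) (i + m) = (i : Int) := by
          unfold pvD; rw [hL]; push_cast; omega
        have hmem : (i : Int) ∈ pvCand A cv (List.range' i (m + 1)) := by
          rw [← hdj]
          exact pvCand_mem A cv i (m + 1) (i + m)
            (by simp [List.mem_range'_1]) hb
        have hlb := pvCand_lb A cv i (m + 1) (i : Int) (by omega) (by rw [hL]; push_cast; omega)
        rw [if_pos hm, pvBest_eq_some A cv _ _ hmem hlb]
        unfold pvOut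
        rw [hL]; push_cast; ring
      · -- match at the right end: drop it and recurse leftwards
        have hb : pvMism A cv (i + m) = false := decide_eq_false hm
        have harg : ((i + m : Nat) : Int) - 1 = (i : Int) + (m : Int) - 1 := by push_cast; ring
        rw [if_neg hm, harg]
        simp only [Bool.not_true]
        rw [ih i false (by simp only [Bool.cond_true, Bool.cond_false] at hinv ⊢; omega)]
        have hsplit : List.range' i (m + 1) = List.range' i m ++ [i + 1 * m] :=
          List.range'_concat
        unfold pvBest
        rw [hsplit, pvCand_append]
        have hnil : pvCand A cv [i + 1 * m] = [] := by
          simp [pvCand, hb]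
        rw [hnil, List.append_nil]
    | false =>
      simp only [Bool.false_eq_true, if_false]
      by_cases hm : (PySem.List.pyGet? A ((i : Nat) : Int)).getD 0 ≠ cv
      · -- mismatch at the left end: A returns l-1-i, the minimal candidate is i
        have hb : pvMism A cv i = true := decide_eq_true hm
        have hL : (A.length : Int) = 2 * i + m + 2 := by
          simp only [Bool.cond_false] at hinv; push_cast [← hinv]; ring
        have hdi : pvD (A.length : Int) i = (i : Int) := by
          unfold pvD; rw [hL]; omega
        have hmem : (i : Int) ∈ pvCand A cv (List.range' i (m + 1)) := by
          rw [← hdi]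
          exact pvCand_mem A cv i (m + 1) i
            (by simp [List.mem_range'_1]) hb
        have hlb := pvCand_lb A cv i (m + 1) (i : Int) (by omega) (by rw [hL]; push_cast; omega)
        rw [if_pos hm, pvBest_eq_some A cv _ _ hmem hlb]
        unfold pvOut
        rfl
      · -- match at the left end: drop it and recurse rightwards
        have hb : pvMism A cv i = false := decide_eq_false hm
        have hi1 : (i : Int) + 1 = ((i + 1 : Nat) : Int) := by push_cast; ring
        have harg : (i : Int) + ((m + 1 : Nat) : Int) - 1 = ((i + 1 : Nat) : Int) + (m : Int) - 1 := by
          push_cast; ring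
        rw [if_neg hm, hi1, harg]
        simp only [Bool.not_false]
        rw [ih (i + 1) true (by simp only [Bool.cond_true, Bool.cond_false] at hinv ⊢; omega)]
        have hsplit : List.range' i (m + 1) = i :: List.range' (i + 1) m := List.range'_succ
        unfold pvBest
        rw [hsplit]
        have hdrop : pvCand A cv (i :: List.range' (i + 1) m)
            = pvCand A cv (List.range' (i + 1) m) := by
          simp [pvCand, hb]
        rw [hdrop]

-- ===== VERDICT (by name: the statement is the Claim_ definition above) =====
theorem solution_spec : Claim_equal_solution := by
  intro A _ hpre
  unfold Spec_solution solution
  rw [solution_alt_char]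
  by_cases h1 : A.length = 1
  · -- l == 1: A returns 0; B finds no mismatch at the single position 0
    simp only [h1]
    norm_num
    have hnil : pvCand A ((PySem.List.pyGet? A 0).getD 0) [0] = [] := by
      simp [pvCand, pvMism]
    simp [pvBest, hnil, pvOut]
  · have hne : ¬ ((A.length : Int) == 1) = true := by
      simp; omega
    simp only [hne, if_false, Bool.false_eq_true]
    have := solLoop_char A ((PySem.List.pyGet? A 0).getD 0) A.length 0 true (by simp)
    simp only [Nat.cast_zero, zero_add] at this
    rw [← this]
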